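-- pv_equiv track=rewrite | github.com/ClearAnatomics/ClearMap | ClearMap/gui/gui_utils.py | html_to_ansi
-- ===== SOURCE A (Python) =====
-- def html_to_ansi(msg):  #  WARNING: Will not work correctly with colours
--     codes_dict = {
--         '<nobr>': '',
--         '</nobr>': '',
--         '<br>': '\n',
--         '</em>': '\033[0m',
--         '<em>': '\033[3m'
--     }
--     for k, v in codes_dict.items():
--         msg = msg.replace(k, v)
--     return msg
-- ===== SOURCE B (Python) =====
-- def html_to_ansi(msg):
--     # Drop the <nobr> wrappers with split/join, then turn the three remaining
--     # tags into their ANSI codes in a single left-to-right scan.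
--     msg = ''.join(msg.split('<nobr>'))
--     msg = ''.join(msg.split('</nobr>'))
--     out = []
--     i, n = 0, len(msg)
--     while i < n:
--         if msg.startswith('<br>', i):
--             out.append('\n'); i += 4
--         elif msg.startswith('</em>', i):
--             out.append('\033[0m'); i += 5
--         elif msg.startswith('<em>', i):
--             out.append('\033[3m'); i += 4
--         else:
--             out.append(msg[i]); i += 1
--     return ''.join(out)
-- ===== Notes on version B (the rewrite author's own statement) =====
-- stated objective: alternative
-- what changed: B drops the codes_dict loop of five full str.replace passes: it deletes the two <nobr> wrapper tags via split/join and then substitutes the three remaining tags (<br>, </em>, <em>) in ONE fused left-to-right scan with an explicit index, instead of three further whole-string passes.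
import Mathlib
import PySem

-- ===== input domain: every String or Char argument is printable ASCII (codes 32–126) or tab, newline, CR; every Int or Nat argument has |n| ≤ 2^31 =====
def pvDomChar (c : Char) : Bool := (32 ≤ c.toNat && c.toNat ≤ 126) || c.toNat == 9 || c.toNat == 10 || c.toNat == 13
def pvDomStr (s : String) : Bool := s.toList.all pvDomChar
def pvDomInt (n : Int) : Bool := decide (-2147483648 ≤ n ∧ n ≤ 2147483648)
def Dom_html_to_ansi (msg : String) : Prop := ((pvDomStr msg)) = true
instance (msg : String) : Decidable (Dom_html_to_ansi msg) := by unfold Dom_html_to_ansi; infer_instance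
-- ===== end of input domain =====

-- B replaces the dict-driven loop of five str.replace passes by two split/join
-- deletions plus ONE fused left-to-right scan substituting the three ANSI tags
-- (objective: alternative decomposition; a timing run did not show B faster).

-- ===== PORT A =====
-- literal transliteration of A: build codes_dict, then fold over its items with str.replace
def html_to_ansi (msg : String) : String :=
  let codes_dict : PySem.Dict String String :=
    ((((PySem.Dict.empty.insert "<nobr>" "").insert "</nobr>" "").insert "<br>" "\n").insert
        "</em>" "\x1b[0m").insert "<em>" "\x1b[3m"
  codes_dict.items.foldl (fun m kv => PySem.Str.replace m kv.1 kv.2) msg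

-- ===== PORT B =====
-- port of B's while loop: the obvious structural recursion over the same suffix,
-- appending '\n' / '\x1b[0m' / '\x1b[3m' / the current character exactly as Source B does
def scanTags : List Char → List Char
  | [] => []
  | c :: t =>
    if "<br>".toList.isPrefixOf (c :: t) then '\n' :: scanTags (t.drop 3)
    else if "</em>".toList.isPrefixOf (c :: t) then "\x1b[0m".toList ++ scanTags (t.drop 4)
    else if "<em>".toList.isPrefixOf (c :: t) then "\x1b[3m".toList ++ scanTags (t.drop 3)
    else c :: scanTags t
  termination_by s => s.length
  decreasing_by all_goals simp [List.length_drop]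

-- ''.join(msg.split(tag)) ported with the PySem split/join primitives on the char list
def html_to_ansi_alt (msg : String) : String :=
  let s1 := PySem.Chars.join [] (PySem.Chars.splitOn msg.toList "<nobr>".toList)
  let s2 := PySem.Chars.join [] (PySem.Chars.splitOn s1 "</nobr>".toList)
  String.ofList (scanTags s2)

-- ===== PRECONDITION & SPEC =====
def Spec_html_to_ansi (msg : String) (out : String) : Prop := out = html_to_ansi_alt msg
instance (msg : String) (out : String) : Decidable (Spec_html_to_ansi msg out) := by unfold Spec_html_to_ansi; infer_instance

-- ===== CLAIM (what is proved, stated in full; the proofs are below) =====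
def Claim_equal_html_to_ansi : Prop := ∀ (msg : String), Dom_html_to_ansi msg → Spec_html_to_ansi msg (html_to_ansi msg)

-- ===== LEMMAS AND PROOFS =====

-- clean recursive characterisation of PySem.Chars.replace (for a nonempty pattern)
def repl (k v : List Char) : List Char → List Char
  | [] => []
  | c :: t =>
    if k.isPrefixOf (c :: t) then v ++ repl k v (t.drop (k.length - 1))
    else c :: repl k v t
  termination_by s => s.length
  decreasing_by all_goals simp [List.length_drop]

lemma replace_go_eq (k v : List Char) (hk : k ≠ []) :
    ∀ (fuel : Nat) (l acc : List Char), l.length ≤ fuel →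
      PySem.Chars.replace.go k v fuel l acc = acc.reverse ++ repl k v l := by
  intro fuel
  induction fuel with
  | zero =>
    intro l acc hl
    have : l = [] := by cases l <;> simp_all
    subst this; simp [PySem.Chars.replace.go, repl]
  | succ n ih =>
    intro l acc hl
    cases l with
    | nil => simp [PySem.Chars.replace.go, repl]
    | cons c t =>
      have ht : t.length ≤ n := by simp at hl; omega
      have hklen : 1 ≤ k.length := by cases k <;> simp_all
      rw [PySem.Chars.replace.go]
      by_cases hp : k.isPrefixOf (c :: t) = true
      · rw [if_pos hp]
        have hdrop : List.drop k.length (c :: t) = t.drop (k.length - 1) := by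
          cases hk' : k with
          | nil => exact absurd hk' hk
          | cons a as => simp
        rw [hdrop, ih _ _ (by simp; omega)]
        rw [repl, if_pos hp]
        simp
      · rw [if_neg hp, ih _ _ ht]
        rw [repl, if_neg hp]
        simp

lemma replace_eq_repl (s k v : List Char) (hk : k ≠ []) :
    PySem.Chars.replace s k v = repl k v s := by
  rw [PySem.Chars.replace, if_neg (by simp [List.isEmpty_iff, hk])]
  simpa using replace_go_eq k v hk s.length s [] (by omega)

-- clean recursive characterisation of PySem.Chars.splitOn (for a nonempty separator)
def splt (k : List Char) : List Char → List (List Char)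
  | [] => [[]]
  | c :: t =>
    if k.isPrefixOf (c :: t) then [] :: splt k (t.drop (k.length - 1))
    else (splt k t).modifyHead (c :: ·)
  termination_by s => s.length
  decreasing_by all_goals simp [List.length_drop]

lemma splt_ne_nil (k s : List Char) : splt k s ≠ [] := by
  induction s using splt.induct k with
  | case1 => simp [splt]
  | case2 c t hp ih => rw [splt, if_pos hp]; simp
  | case3 c t hp ih =>
    rw [splt, if_neg hp]
    cases h : splt k t with
    | nil => exact absurd h ih
    | cons p ps => simp [List.modifyHead]

lemma splitOn_go_eq (k : List Char) (hk : k ≠ []) :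
    ∀ (fuel : Nat) (l cur : List Char) (acc : List (List Char)), l.length ≤ fuel →
      PySem.Chars.splitOn.go k fuel l cur acc
        = acc.reverse ++ (splt k l).modifyHead (cur.reverse ++ ·) := by
  intro fuel
  induction fuel with
  | zero =>
    intro l cur acc hl
    have : l = [] := by cases l <;> simp_all
    subst this; simp [PySem.Chars.splitOn.go, splt]
  | succ n ih =>
    intro l cur acc hl
    cases l with
    | nil => simp [PySem.Chars.splitOn.go, splt]
    | cons c t =>
      have ht : t.length ≤ n := by simp at hl; omega
      have hklen : 1 ≤ k.length := by cases k <;> simp_all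
      rw [PySem.Chars.splitOn.go]
      by_cases hp : k.isPrefixOf (c :: t) = true
      · rw [if_pos hp]
        have hdrop : List.drop k.length (c :: t) = t.drop (k.length - 1) := by
          cases hk' : k with
          | nil => exact absurd hk' hk
          | cons a as => simp
        rw [hdrop, ih _ _ _ (by simp; omega)]
        rw [splt, if_pos hp]
        cases h : splt k (t.drop (k.length - 1)) with
        | nil => exact absurd h (splt_ne_nil k _)
        | cons p ps => simp [List.modifyHead]
      · rw [if_neg hp, ih _ _ _ ht]
        rw [splt, if_neg hp]
        cases h : splt k t with
        | nil => exact absurd h (splt_ne_nil k t)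
        | cons p ps => simp [List.modifyHead]

lemma splitOn_eq_splt (s k : List Char) (hk : k ≠ []) :
    PySem.Chars.splitOn s k = splt k s := by
  rw [PySem.Chars.splitOn, splitOn_go_eq k hk _ _ _ _ (by omega)]
  cases h : splt k s with
  | nil => exact absurd h (splt_ne_nil k s)
  | cons p ps => simp [List.modifyHead]

lemma flatten_intersperse_nil (xss : List (List Char)) :
    (List.intersperse ([] : List Char) xss).flatten = xss.flatten := by
  induction xss with
  | nil => rfl
  | cons h t ih => cases t <;> simp_all [List.intersperse]

-- ''.join(s.split(k)) = s.replace(k, '')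
lemma join_splt (k : List Char) (s : List Char) :
    (splt k s).flatten = repl k [] s := by
  induction s using splt.induct k with
  | case1 => simp [splt, repl]
  | case2 c t hp ih =>
    rw [splt, if_pos hp, repl, if_pos hp]
    simpa using ih
  | case3 c t hp ih =>
    rw [splt, if_neg hp, repl, if_neg hp]
    cases h : splt k t with
    | nil => exact absurd h (splt_ne_nil k t)
    | cons p ps => rw [h] at ih; simpa [List.modifyHead] using ih

-- prefix transfer: a prefix of repl k v z that avoids v's first character was a prefix of z
lemma prefix_repl (k : List Char) (vh : Char) (vt : List Char) :
    ∀ (z p : List Char), vh ∉ p → p <+: repl k (vh :: vt) z → p <+: z := by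
  intro z
  induction z using repl.induct k with
  | case1 => intro p _ h; simpa [repl] using h
  | case2 c t hp ih =>
    intro p hvp h
    rw [repl, if_pos hp] at h
    cases p with
    | nil => exact List.nil_prefix
    | cons q qs =>
      exfalso
      have hq : q = vh := by
        rcases h with ⟨r, hr⟩
        simpa using congrArg (fun l => l.head?) hr
      exact hvp (by simp [hq])
  | case3 c t hp ih =>
    intro p hvp h
    rw [repl, if_neg hp] at h
    cases p with
    | nil => exact List.nil_prefix
    | cons q qs =>
      rcases h with ⟨r, hr⟩
      have hq : q = c := by simpa using congrArg (fun l => l.head?) hr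
      have hqs : qs <+: repl k (vh :: vt) t := ⟨r, by simpa using congrArg List.tail hr⟩
      have htail := ih qs (fun h' => hvp (by simp [h'])) hqs
      exact List.cons_prefix_cons.mpr ⟨hq, htail⟩

-- unfolding equations of repl on a cons cell
lemma repl_cons_pos (k v : List Char) (c : Char) (t : List Char)
    (h : k.isPrefixOf (c :: t) = true) :
    repl k v (c :: t) = v ++ repl k v (t.drop (k.length - 1)) := by
  rw [repl, if_pos h]

lemma repl_cons_neg (k v : List Char) (c : Char) (t : List Char)
    (h : ¬ k.isPrefixOf (c :: t) = true) :
    repl k v (c :: t) = c :: repl k v t := by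
  rw [repl, if_neg h]

-- the fused scan equals the three sequential replaces, on EVERY char list
lemma scan_eq_three_aux : ∀ (n : Nat) (L : List Char), L.length ≤ n →
    scanTags L
      = repl ['<','e','m','>'] ['\x1b','[','3','m']
          (repl ['<','/','e','m','>'] ['\x1b','[','0','m']
            (repl ['<','b','r','>'] ['\n'] L)) := by
  intro n
  induction n with
  | zero =>
    intro L hL
    have : L = [] := by cases L <;> simp_all
    subst this; simp [scanTags, repl]
  | succ n ih =>
    intro L hL
    cases L with
    | nil => simp [scanTags, repl]
    | cons c t =>
      have ek3 : "<br>".toList = ['<','b','r','>'] := by decide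
      have ek4 : "</em>".toList = ['<','/','e','m','>'] := by decide
      have ek5 : "<em>".toList = ['<','e','m','>'] := by decide
      have ev4 : "\x1b[0m".toList = ['\x1b','[','0','m'] := by decide
      have ev5 : "\x1b[3m".toList = ['\x1b','[','3','m'] := by decide
      rw [scanTags]
      rw [ek3, ek4, ek5, ev4, ev5]
      by_cases h3 : List.isPrefixOf ['<','b','r','>'] (c :: t) = true
      · rcases List.isPrefixOf_iff_prefix.mp h3 with ⟨t', ht'⟩
        simp only [List.cons_append, List.nil_append] at ht'
        obtain ⟨h1, h2⟩ := List.cons.inj ht'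
        subst h1; subst h2
        rw [if_pos h3]
        have E3 : repl ['<','b','r','>'] ['\n'] ('<'::'b'::'r'::'>'::t')
            = '\n' :: repl ['<','b','r','>'] ['\n'] t' := by
          rw [repl_cons_pos _ _ _ _ h3]
          rw [show (('b'::'r'::'>'::t').drop (List.length ['<','b','r','>'] - 1)) = t' from rfl]
          rfl
        have E4 : ∀ X : List Char,
            repl ['<','/','e','m','>'] ['\x1b','[','0','m'] ('\n' :: X)
              = '\n' :: repl ['<','/','e','m','>'] ['\x1b','[','0','m'] X :=
          fun X => repl_cons_neg _ _ _ _ (by simp [List.isPrefixOf])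
        have E5 : ∀ Y : List Char,
            repl ['<','e','m','>'] ['\x1b','[','3','m'] ('\n' :: Y)
              = '\n' :: repl ['<','e','m','>'] ['\x1b','[','3','m'] Y :=
          fun Y => repl_cons_neg _ _ _ _ (by simp [List.isPrefixOf])
        rw [show (('b'::'r'::'>'::t').drop 3) = t' from rfl]
        rw [E3, E4, E5, ih t' (by simp at hL; omega)]
      · rw [if_neg h3]
        by_cases h4 : List.isPrefixOf ['<','/','e','m','>'] (c :: t) = true
        · rcases List.isPrefixOf_iff_prefix.mp h4 with ⟨t', ht'⟩
          simp only [List.cons_append, List.nil_append] at ht'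
          obtain ⟨h1, h2⟩ := List.cons.inj ht'
          subst h1; subst h2
          rw [if_pos h4]
          have E3 : repl ['<','b','r','>'] ['\n'] ('<'::'/'::'e'::'m'::'>'::t')
              = '<'::'/'::'e'::'m'::'>':: repl ['<','b','r','>'] ['\n'] t' := by
            rw [repl_cons_neg _ _ _ _ h3]
            rw [repl_cons_neg _ _ _ _ (by simp [List.isPrefixOf])]
            rw [repl_cons_neg _ _ _ _ (by simp [List.isPrefixOf])]
            rw [repl_cons_neg _ _ _ _ (by simp [List.isPrefixOf])]
            rw [repl_cons_neg _ _ _ _ (by simp [List.isPrefixOf])]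
          have E4 : ∀ X : List Char,
              repl ['<','/','e','m','>'] ['\x1b','[','0','m'] ('<'::'/'::'e'::'m'::'>'::X)
                = '\x1b'::'['::'0'::'m':: repl ['<','/','e','m','>'] ['\x1b','[','0','m'] X := by
            intro X
            rw [repl_cons_pos _ _ _ _ (by simp [List.isPrefixOf])]
            rw [show (('/'::'e'::'m'::'>'::X).drop (List.length ['<','/','e','m','>'] - 1)) = X from rfl]
            rfl
          have E5 : ∀ Y : List Char,
              repl ['<','e','m','>'] ['\x1b','[','3','m'] ('\x1b'::'['::'0'::'m'::Y)
                = '\x1b'::'['::'0'::'m':: repl ['<','e','m','>'] ['\x1b','[','3','m'] Y := by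
            intro Y
            rw [repl_cons_neg _ _ _ _ (by simp [List.isPrefixOf])]
            rw [repl_cons_neg _ _ _ _ (by simp [List.isPrefixOf])]
            rw [repl_cons_neg _ _ _ _ (by simp [List.isPrefixOf])]
            rw [repl_cons_neg _ _ _ _ (by simp [List.isPrefixOf])]
          rw [show (('/'::'e'::'m'::'>'::t').drop 4) = t' from rfl]
          rw [E3, E4, E5, ih t' (by simp at hL; omega)]
          rfl
        · rw [if_neg h4]
          by_cases h5 : List.isPrefixOf ['<','e','m','>'] (c :: t) = true
          · rcases List.isPrefixOf_iff_prefix.mp h5 with ⟨t', ht'⟩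
            simp only [List.cons_append, List.nil_append] at ht'
            obtain ⟨h1, h2⟩ := List.cons.inj ht'
            subst h1; subst h2
            rw [if_pos h5]
            have E3 : repl ['<','b','r','>'] ['\n'] ('<'::'e'::'m'::'>'::t')
                = '<'::'e'::'m'::'>':: repl ['<','b','r','>'] ['\n'] t' := by
              rw [repl_cons_neg _ _ _ _ h3]
              rw [repl_cons_neg _ _ _ _ (by simp [List.isPrefixOf])]
              rw [repl_cons_neg _ _ _ _ (by simp [List.isPrefixOf])]
              rw [repl_cons_neg _ _ _ _ (by simp [List.isPrefixOf])]
            have E4 : ∀ X : List Char,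
                repl ['<','/','e','m','>'] ['\x1b','[','0','m'] ('<'::'e'::'m'::'>'::X)
                  = '<'::'e'::'m'::'>':: repl ['<','/','e','m','>'] ['\x1b','[','0','m'] X := by
              intro X
              rw [repl_cons_neg _ _ _ _ (by simp [List.isPrefixOf])]
              rw [repl_cons_neg _ _ _ _ (by simp [List.isPrefixOf])]
              rw [repl_cons_neg _ _ _ _ (by simp [List.isPrefixOf])]
              rw [repl_cons_neg _ _ _ _ (by simp [List.isPrefixOf])]
            have E5 : ∀ Y : List Char,
                repl ['<','e','m','>'] ['\x1b','[','3','m'] ('<'::'e'::'m'::'>'::Y)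
                  = '\x1b'::'['::'3'::'m':: repl ['<','e','m','>'] ['\x1b','[','3','m'] Y := by
              intro Y
              rw [repl_cons_pos _ _ _ _ (by simp [List.isPrefixOf])]
              rw [show (('e'::'m'::'>'::Y).drop (List.length ['<','e','m','>'] - 1)) = Y from rfl]
              rfl
            rw [show (('e'::'m'::'>'::t').drop 3) = t' from rfl]
            rw [E3, E4, E5, ih t' (by simp at hL; omega)]
            rfl
          · rw [if_neg h5]
            have e3 : repl ['<','b','r','>'] ['\n'] (c :: t)
                = c :: repl ['<','b','r','>'] ['\n'] t := repl_cons_neg _ _ _ _ h3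
            have hn4 : ¬ List.isPrefixOf ['<','/','e','m','>']
                (c :: repl ['<','b','r','>'] ['\n'] t) = true := by
              intro hpf
              have hpre : ['<','/','e','m','>'] <+: repl ['<','b','r','>'] ['\n'] (c :: t) := by
                rw [e3]; exact List.isPrefixOf_iff_prefix.mp hpf
              have := prefix_repl ['<','b','r','>'] '\n' [] (c :: t) _ (by decide) hpre
              exact h4 (List.isPrefixOf_iff_prefix.mpr this)
            have e4 : repl ['<','/','e','m','>'] ['\x1b','[','0','m']
                  (c :: repl ['<','b','r','>'] ['\n'] t)
                = c :: repl ['<','/','e','m','>'] ['\x1b','[','0','m']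
                    (repl ['<','b','r','>'] ['\n'] t) := repl_cons_neg _ _ _ _ hn4
            have hn5 : ¬ List.isPrefixOf ['<','e','m','>']
                (c :: repl ['<','/','e','m','>'] ['\x1b','[','0','m']
                  (repl ['<','b','r','>'] ['\n'] t)) = true := by
              intro hpf
              have hpre : ['<','e','m','>'] <+: repl ['<','/','e','m','>'] ['\x1b','[','0','m']
                  (repl ['<','b','r','>'] ['\n'] (c :: t)) := by
                rw [e3, e4]; exact List.isPrefixOf_iff_prefix.mp hpf
              have h1 := prefix_repl ['<','/','e','m','>'] '\x1b' ['[','0','m'] _ _ (by decide) hpre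
              have h2 := prefix_repl ['<','b','r','>'] '\n' [] (c :: t) _ (by decide) h1
              exact h5 (List.isPrefixOf_iff_prefix.mpr h2)
            rw [e3, e4, repl_cons_neg _ _ _ _ hn5]
            rw [ih t (by simp at hL; omega)]

lemma scan_eq_three (L : List Char) :
    scanTags L
      = repl "<em>".toList "\x1b[3m".toList
          (repl "</em>".toList "\x1b[0m".toList
            (repl "<br>".toList "\n".toList L)) := by
  have ek3 : "<br>".toList = ['<','b','r','>'] := by decide
  have ek4 : "</em>".toList = ['<','/','e','m','>'] := by decide
  have ek5 : "<em>".toList = ['<','e','m','>'] := by decide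
  have ev3 : "\n".toList = ['\n'] := by decide
  have ev4 : "\x1b[0m".toList = ['\x1b','[','0','m'] := by decide
  have ev5 : "\x1b[3m".toList = ['\x1b','[','3','m'] := by decide
  rw [ek3, ek4, ek5, ev3, ev4, ev5]
  exact scan_eq_three_aux L.length L le_rfl

-- A unfolded: the dict loop is the five sequential replaces
lemma A_unfold (msg : String) :
    html_to_ansi msg
      = PySem.Str.replace (PySem.Str.replace (PySem.Str.replace (PySem.Str.replace
          (PySem.Str.replace msg "<nobr>" "") "</nobr>" "") "<br>" "\n") "</em>" "\x1b[0m")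
          "<em>" "\x1b[3m" := by
  rfl

-- ===== VERDICT (by name: the statement is the Claim_ definition above) =====
theorem html_to_ansi_spec : Claim_equal_html_to_ansi := by
  intro msg _
  unfold Spec_html_to_ansi
  rw [A_unfold]
  unfold html_to_ansi_alt
  simp only [PySem.Str.replace, PySem.Chars.join, String.toList_ofList]
  rw [splitOn_eq_splt _ _ (by decide), List.intercalate,
      flatten_intersperse_nil, join_splt]
  rw [splitOn_eq_splt _ _ (by decide), List.intercalate,
      flatten_intersperse_nil, join_splt]
  rw [replace_eq_repl _ _ _ (by decide), replace_eq_repl _ _ _ (by decide),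
      replace_eq_repl _ _ _ (by decide), replace_eq_repl _ _ _ (by decide),
      replace_eq_repl _ _ _ (by decide)]
  rw [scan_eq_three]
  simp only [show ("".toList) = ([] : List Char) from by decide]
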